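-- pv_equiv track=rewrite | github.com/n-roth12/DFS-Lineup-Tracker | flask_api/api/controllers/LineupOptimizerController.py | convert_lineup_positions
-- ===== SOURCE A (Python) =====
-- def convert_lineup_positions(positions_list: list) -> list:
--     result = []
--     if len(positions_list) < 1:
--         return result
--
--     prev = positions_list.pop(0)
--     prev_count = 0
--     for i in range(len(positions_list)):
--         temp = positions_list.pop(0)
--         if temp != prev:
--             result.append(prev + (str(prev_count + 1) if prev_count > 0  else ""))
--             prev_count = 0
--         else:
--             prev_count += 1
--             result.append(prev + str(prev_count))
--         prev = temp
--
--     result.append(prev + (str(prev_count + 1) if prev_count > 0 else ""))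
--
--     return result
-- ===== SOURCE B (Python) =====
-- def convert_lineup_positions(positions_list: list) -> list:
--     result = []
--     while positions_list:
--         label = positions_list.pop(0)
--         count = 1
--         while positions_list and positions_list[0] == label:
--             positions_list.pop(0)
--             count += 1
--         if count == 1:
--             result.append(label)
--         else:
--             result.extend(label + str(i) for i in range(1, count + 1))
--     return result
-- ===== Notes on version B (the rewrite author's own statement) =====
-- stated objective: simpler
-- what changed: Replaces A's single sweep with prev/prev_count bookkeeping and incremental appends by a run-grouping loop that pops a whole run of equal labels, then emits the bare label or label+1..label+k in one go (still emptying the argument list).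
import Mathlib
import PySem

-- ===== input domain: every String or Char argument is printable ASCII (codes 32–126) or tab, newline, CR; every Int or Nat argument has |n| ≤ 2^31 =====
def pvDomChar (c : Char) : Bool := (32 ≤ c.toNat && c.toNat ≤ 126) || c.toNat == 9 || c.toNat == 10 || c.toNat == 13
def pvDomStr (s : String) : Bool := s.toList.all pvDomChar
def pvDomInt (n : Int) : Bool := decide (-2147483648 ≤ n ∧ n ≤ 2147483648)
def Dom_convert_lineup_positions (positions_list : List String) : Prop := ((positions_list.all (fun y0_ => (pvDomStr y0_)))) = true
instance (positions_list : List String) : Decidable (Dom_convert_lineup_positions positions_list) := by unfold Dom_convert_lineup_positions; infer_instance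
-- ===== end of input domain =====

-- B replaces A's prev/prev_count sweep by a run-grouping loop (pop a whole run, then emit its
-- labels in one go); objective: simpler. Both Pythons empty the argument list in place; the
-- equivalence proved here is about the return value.

-- ===== PORT A =====
-- str(n) for the nonnegative counters of both programs
def pvStrOf (n : Nat) : String := PySem.Int.toStr (n : Int)

-- the for-loop of A: state = (prev, prev_count, result); the popped list is the recursion argument
def convertA_loop (rest : List String) (prev : String) (prev_count : Nat) (result : List String) : List String :=
  match rest with
  | [] => result ++ [prev ++ (if prev_count > 0 then pvStrOf (prev_count + 1) else "")]
  | temp :: rest' =>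
    if temp ≠ prev then
      convertA_loop rest' temp 0 (result ++ [prev ++ (if prev_count > 0 then pvStrOf (prev_count + 1) else "")])
    else
      convertA_loop rest' temp (prev_count + 1) (result ++ [prev ++ pvStrOf (prev_count + 1)])

def convert_lineup_positions (positions_list : List String) : List String :=
  match positions_list with
  | [] => []
  | prev :: rest => convertA_loop rest prev 0 []

-- ===== PORT B =====
-- the inner while-loop of B: pops the leading elements equal to label, returns (extra count, remainder)
def pvTakeRun (label : String) : List String → Nat × List String
  | [] => (0, [])
  | x :: xs => if x = label then ((pvTakeRun label xs).1 + 1, (pvTakeRun label xs).2) else (0, x :: xs)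

theorem pvTakeRun_length (label : String) (xs : List String) :
    (pvTakeRun label xs).2.length ≤ xs.length := by
  induction xs with
  | nil => simp [pvTakeRun]
  | cons x xs ih =>
    simp only [pvTakeRun]
    split
    · exact le_trans ih (Nat.le_succ _)
    · simp

-- the outer while-loop of B: take the whole run (length = (pvTakeRun …).1 + 1), emit its block
def convert_lineup_positions_alt : List String → List String
  | [] => []
  | label :: rest =>
    (if (pvTakeRun label rest).1 + 1 = 1 then [label]
     else (List.range' 1 ((pvTakeRun label rest).1 + 1)).map (fun i => label ++ pvStrOf i))
      ++ convert_lineup_positions_alt (pvTakeRun label rest).2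
termination_by l => l.length
decreasing_by
  simpa using Nat.lt_succ_of_le (pvTakeRun_length label rest)

-- ===== PRECONDITION & SPEC =====
def Spec_convert_lineup_positions (positions_list : List String) (out : List String) : Prop := out = convert_lineup_positions_alt positions_list
instance (positions_list : List String) (out : List String) : Decidable (Spec_convert_lineup_positions positions_list out) := by unfold Spec_convert_lineup_positions; infer_instance

-- ===== CLAIM (what is proved, stated in full; the proofs are below) =====
def Claim_equal_convert_lineup_positions : Prop := ∀ (positions_list : List String), Dom_convert_lineup_positions positions_list → Spec_convert_lineup_positions positions_list (convert_lineup_positions positions_list)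

-- ===== LEMMAS AND PROOFS =====

theorem alt_nil : convert_lineup_positions_alt [] = [] := by
  rw [convert_lineup_positions_alt]

theorem alt_cons (label : String) (rest : List String) :
    convert_lineup_positions_alt (label :: rest)
      = (if (pvTakeRun label rest).1 + 1 = 1 then [label]
         else (List.range' 1 ((pvTakeRun label rest).1 + 1)).map (fun i => label ++ pvStrOf i))
        ++ convert_lineup_positions_alt (pvTakeRun label rest).2 := by
  rw [convert_lineup_positions_alt]

-- the accumulator of A's loop factors out
theorem convertA_loop_acc (rest : List String) (prev : String) (c : Nat) (res : List String) :
    convertA_loop rest prev c res = res ++ convertA_loop rest prev c [] := by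
  induction rest generalizing prev c res with
  | nil => simp [convertA_loop]
  | cons t r ih =>
    simp only [convertA_loop]
    split
    · rw [ih _ _ (res ++ _), ih _ _ ([] ++ _)]
      simp
    · rw [ih _ _ (res ++ _), ih _ _ ([] ++ _)]
      simp

-- a completed run of length m+1, as A emits it, equals B's run block
theorem runOut_eq (t : String) (m : Nat) :
    ((List.range' 1 m).map (fun i => t ++ pvStrOf i)) ++ [t ++ (if m > 0 then pvStrOf (m + 1) else "")]
      = (if m + 1 = 1 then [t] else (List.range' 1 (m + 1)).map (fun i => t ++ pvStrOf i)) := by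
  cases m with
  | zero => simp
  | succ k =>
    rw [if_pos (show k + 1 > 0 by omega), if_neg (show k + 1 + 1 ≠ 1 by omega)]
    conv_rhs => rw [List.range'_concat]
    simp [Nat.add_comm]

-- main invariant: A's loop in the middle of a run of prev with counter c produces the rest of
-- the run as B would, followed by B's output on the remainder
theorem convertA_loop_eq (rest : List String) (prev : String) (c : Nat) :
    convertA_loop rest prev c []
      = ((List.range' (c + 1) (pvTakeRun prev rest).1).map (fun i => prev ++ pvStrOf i))
        ++ [prev ++ (if c + (pvTakeRun prev rest).1 > 0 then pvStrOf (c + (pvTakeRun prev rest).1 + 1) else "")]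
        ++ convert_lineup_positions_alt (pvTakeRun prev rest).2 := by
  induction rest generalizing prev c with
  | nil => simp [convertA_loop, pvTakeRun, alt_nil]
  | cons t r ih =>
    by_cases ht : t = prev
    · subst ht
      have h1 : convertA_loop (t :: r) t c [] = convertA_loop r t (c + 1) ([] ++ [t ++ pvStrOf (c + 1)]) := by
        simp [convertA_loop]
      have hn : (pvTakeRun t (t :: r)).1 = (pvTakeRun t r).1 + 1 := by simp [pvTakeRun]
      have hr2 : (pvTakeRun t (t :: r)).2 = (pvTakeRun t r).2 := by simp [pvTakeRun]
      rw [h1, convertA_loop_acc, ih t (c + 1), hn, hr2,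
        List.range'_succ (s := c + 1) (n := (pvTakeRun t r).1)]
      have he : c + 1 + (pvTakeRun t r).1 = c + ((pvTakeRun t r).1 + 1) := by omega
      simp [he]
    · have h1 : convertA_loop (t :: r) prev c []
          = convertA_loop r t 0 ([] ++ [prev ++ (if c > 0 then pvStrOf (c + 1) else "")]) := by
        simp [convertA_loop, ht]
      have hn : pvTakeRun prev (t :: r) = (0, t :: r) := by simp [pvTakeRun, ht]
      rw [h1, convertA_loop_acc, ih t 0, hn]
      rw [alt_cons t r, ← runOut_eq t (pvTakeRun t r).1]
      simp

theorem convert_eq (positions_list : List String) :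
    convert_lineup_positions positions_list = convert_lineup_positions_alt positions_list := by
  cases positions_list with
  | nil => simp [convert_lineup_positions, alt_nil]
  | cons p rest =>
    rw [show convert_lineup_positions (p :: rest) = convertA_loop rest p 0 [] from rfl,
      convertA_loop_eq rest p 0, alt_cons p rest, ← runOut_eq p (pvTakeRun p rest).1]
    simp

-- ===== VERDICT (by name: the statement is the Claim_ definition above) =====
theorem convert_lineup_positions_spec : Claim_equal_convert_lineup_positions := by
  intro l _
  exact convert_eq l
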